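-- pv_equiv track=rewrite | github.com/SalvatoreJAmico/intermodal-yard-decision-support | app.py | next_departure_label
-- ===== SOURCE A (Python) =====
-- DEPARTURE_TOD_MINS = [360, 720, 1080, 1380]  # 06:00, 12:00, 18:00, 23:00
--
-- def next_departure_label(sim_minute: int) -> str:
--     """
--     Returns HH:MM label for the next scheduled departure, based on time-of-day.
--     """
--     tod = sim_minute % 1440
--     for d in DEPARTURE_TOD_MINS:
--         if d > tod:
--             hh = d // 60
--             mm = d % 60
--             return f"{hh:02d}:{mm:02d}"
--     return "06:00"
-- ===== SOURCE B (Python) =====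
-- import bisect
--
-- DEPARTURE_TOD_MINS = [360, 720, 1080, 1380]  # 06:00, 12:00, 18:00, 23:00
--
-- def next_departure_label(sim_minute: int) -> str:
--     tod = sim_minute % 1440
--     idx = bisect.bisect_right(DEPARTURE_TOD_MINS, tod) % len(DEPARTURE_TOD_MINS)
--     d = DEPARTURE_TOD_MINS[idx]
--     return f"{d // 60:02d}:{d % 60:02d}"
-- ===== Notes on version B (the rewrite author's own statement) =====
-- stated objective: idiomatic
-- what changed: Replaces the linear scan with early return by a bisect_right binary search for the first departure after tod, wrapping the insertion point modulo the list length so past-last falls back to the first departure.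
import Mathlib
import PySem

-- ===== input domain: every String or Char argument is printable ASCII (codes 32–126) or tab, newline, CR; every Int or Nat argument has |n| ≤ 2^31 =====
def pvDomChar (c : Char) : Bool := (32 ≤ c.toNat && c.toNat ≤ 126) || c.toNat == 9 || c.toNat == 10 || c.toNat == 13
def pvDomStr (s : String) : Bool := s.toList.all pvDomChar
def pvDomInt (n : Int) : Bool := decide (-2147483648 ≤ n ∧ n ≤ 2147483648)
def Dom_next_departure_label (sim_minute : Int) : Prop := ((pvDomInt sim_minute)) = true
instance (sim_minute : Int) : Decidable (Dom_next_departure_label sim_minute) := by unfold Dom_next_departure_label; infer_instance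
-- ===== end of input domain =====

-- B replaces A's linear scan with a bisect_right binary search wrapped modulo the list length (idiomatic; return value only).

-- shared module constant
def DEPARTURE_TOD_MINS : List Int := [360, 720, 1080, 1380]

-- f"{n:02d}" for the nonnegative values that occur here
def fmt2 (n : Int) : String := if n < 10 then "0" ++ PySem.Int.toStr n else PySem.Int.toStr n

-- ===== PORT A =====
-- the for-loop with early return, as structural recursion over the list
def nextLoopA (tod : Int) : List Int → String
  | [] => "06:00"
  | d :: rest =>
    if d > tod then fmt2 (PySem.Int.floordiv d 60) ++ ":" ++ fmt2 (PySem.Int.mod d 60)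
    else nextLoopA tod rest

def next_departure_label (sim_minute : Int) : String :=
  nextLoopA (PySem.Int.mod sim_minute 1440) DEPARTURE_TOD_MINS

-- ===== PORT B =====
def next_departure_label_alt (sim_minute : Int) : String :=
  let tod := PySem.Int.mod sim_minute 1440
  let idx := (PySem.List.bisectRight DEPARTURE_TOD_MINS tod) % DEPARTURE_TOD_MINS.length
  let d := DEPARTURE_TOD_MINS.getD idx 0   -- DEPARTURE_TOD_MINS[idx]; idx is always in range
  fmt2 (PySem.Int.floordiv d 60) ++ ":" ++ fmt2 (PySem.Int.mod d 60)

-- ===== PRECONDITION & SPEC =====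
def Spec_next_departure_label (sim_minute : Int) (out : String) : Prop := out = next_departure_label_alt sim_minute
instance (sim_minute : Int) (out : String) : Decidable (Spec_next_departure_label sim_minute out) := by unfold Spec_next_departure_label; infer_instance

-- ===== CLAIM (what is proved, stated in full; the proofs are below) =====
def Claim_equal_next_departure_label : Prop := ∀ (sim_minute : Int), Dom_next_departure_label sim_minute → Spec_next_departure_label sim_minute (next_departure_label sim_minute)

-- ===== LEMMAS AND PROOFS =====

lemma both_eq (t : Int) (h0 : 0 ≤ t) (h1 : t < 1440) :
    nextLoopA t DEPARTURE_TOD_MINS =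
      fmt2 (PySem.Int.floordiv (DEPARTURE_TOD_MINS.getD ((PySem.List.bisectRight DEPARTURE_TOD_MINS t) % DEPARTURE_TOD_MINS.length) 0) 60) ++ ":" ++
      fmt2 (PySem.Int.mod (DEPARTURE_TOD_MINS.getD ((PySem.List.bisectRight DEPARTURE_TOD_MINS t) % DEPARTURE_TOD_MINS.length) 0) 60) := by
  by_cases ha : t < 360
  · have e : PySem.List.bisectRight [(360:Int), 720, 1080, 1380] t = 0 := by
      simp [PySem.List.bisectRight, PySem.List.bisectRightLoop, ha, show t < 720 by omega,
        show t < 1080 by omega]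
    simp [nextLoopA, DEPARTURE_TOD_MINS, e, show (360:Int) > t from ha]
  · by_cases hb : t < 720
    · have e : PySem.List.bisectRight [(360:Int), 720, 1080, 1380] t = 1 := by
        simp [PySem.List.bisectRight, PySem.List.bisectRightLoop, ha, hb, show t < 1080 by omega]
      simp [nextLoopA, DEPARTURE_TOD_MINS, e, show ¬((360:Int) > t) by omega,
        show (720:Int) > t from hb]
    · by_cases hc : t < 1080
      · have e : PySem.List.bisectRight [(360:Int), 720, 1080, 1380] t = 2 := by
          simp [PySem.List.bisectRight, PySem.List.bisectRightLoop, hb, hc]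
        simp [nextLoopA, DEPARTURE_TOD_MINS, e, show ¬((360:Int) > t) by omega,
          show ¬((720:Int) > t) by omega, show (1080:Int) > t from hc]
      · by_cases hd : t < 1380
        · have e : PySem.List.bisectRight [(360:Int), 720, 1080, 1380] t = 3 := by
            simp [PySem.List.bisectRight, PySem.List.bisectRightLoop, hc, hd]
          simp [nextLoopA, DEPARTURE_TOD_MINS, e, show ¬((360:Int) > t) by omega,
            show ¬((720:Int) > t) by omega, show ¬((1080:Int) > t) by omega,
            show (1380:Int) > t from hd]
        · have e : PySem.List.bisectRight [(360:Int), 720, 1080, 1380] t = 4 := by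
            simp [PySem.List.bisectRight, PySem.List.bisectRightLoop, hc, hd]
          simp [nextLoopA, DEPARTURE_TOD_MINS, e, show ¬((360:Int) > t) by omega,
            show ¬((720:Int) > t) by omega, show ¬((1080:Int) > t) by omega,
            show ¬((1380:Int) > t) by omega]
          decide

-- ===== VERDICT (by name: the statement is the Claim_ definition above) =====
theorem next_departure_label_spec : Claim_equal_next_departure_label := by
  intro s _
  show next_departure_label s = next_departure_label_alt s
  have h0 := PySem.Int.mod_nonneg s (b := 1440) (by norm_num)
  have h1 := PySem.Int.mod_lt s (b := 1440) (by norm_num)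
  simpa [next_departure_label, next_departure_label_alt] using both_eq _ h0 h1
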